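-- pv_equiv track=rewrite | github.com/eriq-augustine/242-2016 | code/features.py | buildMap
-- ===== SOURCE A (Python) =====
-- def buildMap(businesses, column):
--     attributeMap = {}
--     count = 0
--
--     for business in businesses:
--         for attribute in splitWithEmpty(business[column]):
--             if attribute not in attributeMap:
--                 attributeMap[attribute] = count
--                 count += 1
--
--     return attributeMap
--
-- def splitWithEmpty(val):
--     return [x for x in val.split(';;') if x != '']
-- ===== SOURCE B (Python) =====
-- def buildMap(businesses, column):
--     attrs = []
--     for business in businesses:
--         attrs.extend(splitWithEmpty(business[column]))
--     ordered = sorted(set(attrs), key=attrs.index)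
--     return {a: i for i, a in enumerate(ordered)}
--
-- def splitWithEmpty(val):
--     return [x for x in val.split(';;') if x != '']
-- ===== Notes on version B (the rewrite author's own statement) =====
-- stated objective: alternative
-- what changed: Instead of one interleaved pass with a running counter and dict-membership test, B collects every attribute into a flat list, takes the distinct attributes as a set, SORTS them by position of first occurrence (attrs.index) and enumerates the sorted order into indices; Pre_ excludes inputs where some business lacks the column key (KeyError in both A and B).
import Mathlib
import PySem

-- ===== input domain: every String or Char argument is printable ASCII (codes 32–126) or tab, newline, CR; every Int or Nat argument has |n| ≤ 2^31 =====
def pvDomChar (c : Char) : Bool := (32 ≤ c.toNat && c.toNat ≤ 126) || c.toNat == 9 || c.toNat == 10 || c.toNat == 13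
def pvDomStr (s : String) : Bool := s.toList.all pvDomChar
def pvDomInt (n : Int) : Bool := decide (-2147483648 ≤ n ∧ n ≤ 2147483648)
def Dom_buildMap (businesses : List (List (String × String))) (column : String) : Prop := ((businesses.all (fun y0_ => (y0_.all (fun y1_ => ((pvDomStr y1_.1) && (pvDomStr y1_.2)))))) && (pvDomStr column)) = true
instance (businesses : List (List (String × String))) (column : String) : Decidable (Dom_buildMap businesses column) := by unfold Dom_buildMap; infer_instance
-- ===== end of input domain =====

-- B replaces A's interleaved insert-and-count loop with: collect all attributes, take the distinct
-- ones as a set, sort them by position of first occurrence, enumerate (return value only; alternative).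

-- ===== PORT A =====
-- helper shared by both sources (identical in Source A and Source B)
def splitWithEmpty (val : String) : List String :=
  ((PySem.Str.split? val ";;").getD []).filter (fun x => x ≠ "")

def buildMap (businesses : List (List (String × String))) (column : String) : List (String × Int) :=
  (businesses.foldl
    (fun (st : PySem.Dict String Int × Int) business =>
      (splitWithEmpty ((PySem.Dict.mk business).getD column "")).foldl
        (fun st attr =>
          if st.1.contains attr then st
          else (st.1.insert attr st.2, st.2 + 1))
        st)
    (PySem.Dict.empty, 0)).1.items

-- ===== PORT B =====
-- sorted(set(attrs), key=attrs.index): the key (first-occurrence position) is injective on the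
-- distinct attributes, so Python's set-iteration order cannot influence the result.
def buildMap_alt (businesses : List (List (String × String))) (column : String) : List (String × Int) :=
  let attrs := businesses.foldl
    (fun acc b => acc ++ splitWithEmpty ((PySem.Dict.mk b).getD column "")) []
  let ordered := PySem.List.sorted (PySem.Set.ofList attrs)
    (fun a => (PySem.List.index? attrs a).getD 0) false
  (PySem.List.enumerate ordered).map (fun p => (p.2, p.1))

-- ===== PRECONDITION & SPEC =====
-- Pre_ excludes inputs where some business lacks the column key: there Python A raises KeyError (and B does too).
def Pre_buildMap (businesses : List (List (String × String))) (column : String) : Prop :=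
  (businesses.all (fun b => b.any (fun p => p.1 == column))) = true
instance (businesses : List (List (String × String))) (column : String) : Decidable (Pre_buildMap businesses column) := by unfold Pre_buildMap; infer_instance
def pvWitness_buildMap : (List (List (String × String))) × String :=
  ([[("c", "a;;b;;a")], [("c", ";;b;;x")]], "c")

def Spec_buildMap (businesses : List (List (String × String))) (column : String) (out : List (String × Int)) : Prop := out = buildMap_alt businesses column
instance (businesses : List (List (String × String))) (column : String) (out : List (String × Int)) : Decidable (Spec_buildMap businesses column out) := by unfold Spec_buildMap; infer_instance

-- ===== CLAIM (what is proved, stated in full; the proofs are below) =====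
def Claim_equal_buildMap : Prop := ∀ (businesses : List (List (String × String))) (column : String), Dom_buildMap businesses column → Pre_buildMap businesses column → Spec_buildMap businesses column (buildMap businesses column)

-- ===== LEMMAS AND PROOFS =====

-- A's state after consuming the attr sequence `seen` (dict as items of enumerated dedup, plus the counter)
def pvStateOf (seen : List String) : PySem.Dict String Int × Int :=
  (PySem.Dict.mk ((PySem.List.enumerate (PySem.List.dedup seen)).map (fun p => (p.2, p.1))),
   (PySem.List.dedup seen).length)

theorem pv_contains (seen : List String) (x : String) :
    (pvStateOf seen).1.contains x = decide (x ∈ PySem.List.dedup seen) := by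
  rw [PySem.Dict.contains_eq_decide_mem_keys]
  simp only [pvStateOf, PySem.Dict.keys_mk, List.map_map]
  congr 1
  rw [show ((fun p : String × Int => p.1) ∘ fun p : Int × String => (p.2, p.1)) =
        (fun p : Int × String => p.2) from rfl,
      PySem.List.map_snd_enumerate]

theorem pv_dedup_append (seen : List String) (x : String) :
    PySem.List.dedup (seen ++ [x]) =
      if x ∈ PySem.List.dedup seen then PySem.List.dedup seen
      else PySem.List.dedup seen ++ [x] := by
  simp only [PySem.List.dedup_eq_ofList, PySem.Set.ofList_append]
  show (PySem.Set.ofList seen).add x = _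
  simp [PySem.Set.add, PySem.Set.contains]

theorem pv_step (seen : List String) (x : String) :
    (if (pvStateOf seen).1.contains x then pvStateOf seen
     else ((pvStateOf seen).1.insert x (pvStateOf seen).2, (pvStateOf seen).2 + 1))
    = pvStateOf (seen ++ [x]) := by
  rw [pv_contains]
  by_cases hx : x ∈ PySem.List.dedup seen
  · simp only [hx, decide_true, if_true, pvStateOf, pv_dedup_append]
  · simp only [hx, decide_false, Bool.false_eq_true, if_false]
    have hc : (pvStateOf seen).1.contains x = false := by
      rw [pv_contains]; simpa using hx
    have hins : ((pvStateOf seen).1.insert x (pvStateOf seen).2).items =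
        (pvStateOf seen).1.items ++ [(x, (pvStateOf seen).2)] :=
      PySem.Dict.items_insert_of_not_contains _ _ hc
    simp only [pvStateOf] at hins ⊢
    rw [pv_dedup_append, if_neg hx]
    refine Prod.ext ?_ ?_
    · apply PySem.Dict.ext
      rw [hins]
      simp [PySem.List.enumerate_append]
    · simp

theorem pv_inner (xs seen : List String) :
    xs.foldl (fun st attr =>
        if st.1.contains attr then st
        else (st.1.insert attr st.2, st.2 + 1)) (pvStateOf seen)
    = pvStateOf (seen ++ xs) := by
  induction xs generalizing seen with
  | nil => simp
  | cons x xs ih =>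
    simp only [List.foldl_cons, pv_step seen x, ih (seen ++ [x]), List.append_assoc,
      List.singleton_append]

-- the distinct attributes, in first-appearance order, have strictly increasing first indices
theorem pv_dedup_pairwise_idx (xs : List String) :
    (PySem.List.dedup xs).Pairwise
      (fun a b => (PySem.List.index? xs a).getD 0 < (PySem.List.index? xs b).getD 0) := by
  induction xs using List.reverseRecOn with
  | nil => simp [PySem.List.dedup]
  | append_singleton l x ih =>
    rw [pv_dedup_append]
    by_cases hx : x ∈ PySem.List.dedup l
    · rw [if_pos hx]
      refine ih.imp_of_mem ?_
      intro a b ha hb h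
      have ha' : a ∈ l := by rwa [PySem.List.mem_dedup] at ha
      have hb' : b ∈ l := by rwa [PySem.List.mem_dedup] at hb
      rwa [PySem.List.index?_append_of_mem _ ha', PySem.List.index?_append_of_mem _ hb']
    · rw [if_neg hx]
      have hxl : x ∉ l := by rwa [PySem.List.mem_dedup] at hx
      rw [List.pairwise_append]
      refine ⟨ih.imp_of_mem ?_, by simp, ?_⟩
      · intro a b ha hb h
        have ha' : a ∈ l := by rwa [PySem.List.mem_dedup] at ha
        have hb' : b ∈ l := by rwa [PySem.List.mem_dedup] at hb
        rwa [PySem.List.index?_append_of_mem _ ha', PySem.List.index?_append_of_mem _ hb']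
      · intro a ha b hb
        have ha' : a ∈ l := by rwa [PySem.List.mem_dedup] at ha
        rw [List.mem_singleton] at hb
        subst hb
        rw [PySem.List.index?_append_of_mem _ ha',
          PySem.List.index?_append_singleton_self l b hxl]
        obtain ⟨k, hk⟩ := Option.isSome_iff_exists.mp ((PySem.List.index?_isSome_iff l a).mpr ha')
        obtain ⟨hlt, -, -⟩ := PySem.List.getElem_of_index?_eq_some hk
        simp only [hk, Option.getD_some]
        exact hlt

-- Python's sorted(set(attrs), key=attrs.index) is exactly dedup attrs
theorem pv_sorted_ofList (attrs : List String) :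
    PySem.List.sorted (PySem.Set.ofList attrs)
      (fun a => (PySem.List.index? attrs a).getD 0) false = PySem.List.dedup attrs := by
  refine PySem.List.sorted_eq_of_perm_of_pairwise_lt _ _ _ ?_ (pv_dedup_pairwise_idx attrs)
  rw [PySem.List.dedup_eq_ofList]

-- ===== VERDICT (by name: the statement is the Claim_ definition above) =====
theorem buildMap_spec : Claim_equal_buildMap := by
  intro businesses column _ _
  unfold Spec_buildMap buildMap buildMap_alt
  simp only [pv_sorted_ofList]
  rw [show (PySem.Dict.empty, (0 : Int)) = pvStateOf [] from rfl]
  rw [show (businesses.foldl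
      (fun acc b => acc ++ splitWithEmpty ((PySem.Dict.mk b).getD column "")) []) =
      businesses.flatMap (fun b => splitWithEmpty ((PySem.Dict.mk b).getD column "")) from by
    rw [PySem.List.foldl_append_eq_flatMap]; rfl]
  rw [← List.foldl_flatMap, pv_inner, List.nil_append]
  rfl
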